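-- pv_equiv track=rewrite | github.com/egorOsAndr/test_task | task4/taxk4.py | func
-- ===== SOURCE A (Python) =====
-- def func(arr: list) -> int:
--     size_arr = len(arr)
--     count = 0
--     if size_arr % 2 != 0:
--         index = size_arr // 2
--         med = arr[index]
--         for num in arr:
--             count += abs(med - num)
--         return count
--     else:
--         two = [0, 0]
--         index1 = (size_arr // 2) - 1
--         index2 = size_arr // 2
--         med1 = arr[index1]
--         med2 = arr[index2]
--         for num in arr:
--             two[0] += abs(med1 - num)
--             two[1] += abs(med2 - num)
--         return min(two)
-- ===== SOURCE B (Python) =====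
-- def func(arr: list) -> int:
--     n = len(arr)
--     if n % 2 != 0:
--         pivots = [arr[n // 2]]
--     else:
--         pivots = [arr[n // 2 - 1], arr[n // 2]]
--     s = sorted(arr)
--     prefix = [0]
--     for x in s:
--         prefix.append(prefix[-1] + x)
--     total = prefix[n]
--     best = None
--     for p in pivots:
--         k = 0
--         while k < n and s[k] < p:
--             k += 1
--         cost = (p * k - prefix[k]) + (total - prefix[k] - p * (n - k))
--         if best is None or cost < best:
--             best = cost
--     return best
-- ===== Notes on version B (the rewrite author's own statement) =====
-- stated objective: alternative
-- what changed: B replaces A's direct accumulation of absolute deviations by a sort-and-prefix-sum algorithm: it sorts the array, builds a running prefix-sum table, finds each pivot's split point in the sorted order, and obtains the deviation sum from the closed-form partition formula p*k - prefix[k] + (total - prefix[k] - p*(n-k)), taking the minimum over the one or two middle pivots.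
import Mathlib
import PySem

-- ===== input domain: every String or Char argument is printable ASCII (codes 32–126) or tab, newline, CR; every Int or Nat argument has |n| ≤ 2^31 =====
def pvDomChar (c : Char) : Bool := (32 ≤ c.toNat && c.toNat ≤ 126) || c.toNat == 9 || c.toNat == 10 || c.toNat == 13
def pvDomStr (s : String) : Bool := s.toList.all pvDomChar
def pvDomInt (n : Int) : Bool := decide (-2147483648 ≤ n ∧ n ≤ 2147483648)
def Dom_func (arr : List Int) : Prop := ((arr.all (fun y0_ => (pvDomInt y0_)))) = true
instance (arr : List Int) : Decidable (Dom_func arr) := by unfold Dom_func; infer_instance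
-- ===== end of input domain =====

-- B computes the same deviation sums by sorting, prefix sums and a closed-form partition formula (objective: alternative algorithm).

-- ===== PORT A =====
def func (arr : List Int) : Int :=
  let size_arr : Int := arr.length
  let count : Int := 0
  if PySem.Int.mod size_arr 2 ≠ 0 then
    let index := PySem.Int.floordiv size_arr 2
    let med := PySem.List.pyGetD arr index 0
    arr.foldl (fun c num => c + |med - num|) count
  else
    let two : Int × Int := (0, 0)
    let index1 := PySem.Int.floordiv size_arr 2 - 1
    let index2 := PySem.Int.floordiv size_arr 2
    let med1 := PySem.List.pyGetD arr index1 0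
    let med2 := PySem.List.pyGetD arr index2 0
    let two := arr.foldl (fun t num => (t.1 + |med1 - num|, t.2 + |med2 - num|)) two
    min two.1 two.2

-- ===== PORT B =====
-- the 'while k < n and s[k] < p' split-point loop of Source B ported step for step
def pvSplit (s : List Int) (p : Int) (n k : Nat) : Nat :=
  if h : k < n ∧ PySem.List.pyGetD s (k : Int) 0 < p then
    pvSplit s p n (k + 1)
  else k
termination_by n - k
decreasing_by omega

def func_alt (arr : List Int) : Int :=
  let n : Nat := arr.length
  let pivots : List Int :=
    if PySem.Int.mod (n : Int) 2 ≠ 0 then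
      [PySem.List.pyGetD arr (PySem.Int.floordiv (n : Int) 2) 0]
    else
      [PySem.List.pyGetD arr (PySem.Int.floordiv (n : Int) 2 - 1) 0,
       PySem.List.pyGetD arr (PySem.Int.floordiv (n : Int) 2) 0]
  let s := PySem.List.sorted arr (fun x => x) false
  let prefx := s.foldl (fun pre x => pre ++ [PySem.List.pyGetD pre (-1) 0 + x]) [(0 : Int)]
  let total := PySem.List.pyGetD prefx (n : Int) 0
  let best : Option Int := pivots.foldl (fun best p =>
    let k := pvSplit s p n 0
    let cost := (p * k - PySem.List.pyGetD prefx (k : Int) 0)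
                + (total - PySem.List.pyGetD prefx (k : Int) 0 - p * ((n : Int) - k))
    match best with
    | none => some cost
    | some b => if cost < b then some cost else some b) none
  best.getD 0

-- ===== PRECONDITION & SPEC =====
-- A (and B) raise IndexError on the empty list (arr[-1] / arr[0]); both return on every nonempty list.
def Pre_func (arr : List Int) : Prop := arr ≠ []
instance (arr : List Int) : Decidable (Pre_func arr) := by unfold Pre_func; infer_instance
def pvWitness_func : List Int := [3, 1, 2, 5]
def Spec_func (arr : List Int) (out : Int) : Prop := out = func_alt arr
instance (arr : List Int) (out : Int) : Decidable (Spec_func arr out) := by unfold Spec_func; infer_instance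

-- ===== CLAIM (what is proved, stated in full; the proofs are below) =====
def Claim_equal_func : Prop := ∀ (arr : List Int), Dom_func arr → Pre_func arr → Spec_func arr (func arr)

-- ===== LEMMAS AND PROOFS =====

-- running prefix sums, as a pure recursion
def pvScan (a : Int) : List Int → List Int
  | [] => [a]
  | x :: r => a :: pvScan (a + x) r

theorem foldl_prefix (s : List Int) : ∀ (pre : List Int) (a : Int), pre ≠ [] →
    PySem.List.pyGetD pre (-1) 0 = a →
    s.foldl (fun pre x => pre ++ [PySem.List.pyGetD pre (-1) 0 + x]) pre
      = pre.dropLast ++ pvScan a s := by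
  induction s with
  | nil =>
    intro pre a hne hlast
    simp [pvScan, PySem.List.pyGetD_neg_one pre 0 hne] at hlast ⊢
    rw [← hlast]
    exact (List.dropLast_concat_getLast hne).symm
  | cons x r ih =>
    intro pre a hne hlast
    have hpre : pre = pre.dropLast ++ [a] := by
      rw [PySem.List.pyGetD_neg_one pre 0 hne] at hlast
      rw [← hlast]
      exact (List.dropLast_concat_getLast hne).symm
    simp only [List.foldl_cons, hlast]
    rw [ih (pre ++ [a + x]) (a + x) (by simp) (PySem.List.pyGetD_neg_one_append_singleton pre (a + x) 0)]
    rw [List.dropLast_concat]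
    conv_lhs => rw [hpre]
    simp [pvScan]

theorem pvScan_getD (s : List Int) : ∀ (a : Int) (k : Nat), k ≤ s.length →
    (pvScan a s).getD k 0 = a + (s.take k).sum := by
  induction s with
  | nil =>
    intro a k hk
    have : k = 0 := by simpa using hk
    subst this
    simp [pvScan]
  | cons x r ih =>
    intro a k hk
    cases k with
    | zero => simp [pvScan]
    | succ m =>
      simp only [pvScan, List.getD_cons_succ, List.take_succ_cons, List.sum_cons]
      rw [ih (a + x) m (by simpa using hk)]
      ring

theorem pvSplit_eq (s : List Int) (p : Int) :
    ∀ (m k : Nat), k ≤ s.length → s.length - k ≤ m →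
    pvSplit s p s.length k = k + ((s.drop k).takeWhile (fun x => decide (x < p))).length := by
  intro m
  induction m with
  | zero =>
    intro k hk hm
    have : k = s.length := by omega
    subst this
    rw [pvSplit]
    simp
  | succ m ih =>
    intro k hk hm
    rw [pvSplit]
    by_cases hkn : k < s.length
    · have hget : PySem.List.pyGetD s (k : Int) 0 = s[k] := by
        simp [PySem.List.pyGetD_natCast, List.getD_eq_getElem?_getD, List.getElem?_eq_getElem hkn]
      have hdrop : s.drop k = s[k] :: s.drop (k + 1) := List.drop_eq_getElem_cons hkn
      by_cases hlt : s[k] < p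
      · rw [dif_pos ⟨hkn, by rw [hget]; exact hlt⟩]
        rw [ih (k + 1) (by omega) (by omega)]
        rw [hdrop, List.takeWhile_cons_of_pos (by simpa using hlt)]
        simp
        omega
      · rw [dif_neg (by rw [hget]; tauto)]
        rw [hdrop, List.takeWhile_cons_of_neg (by simpa using hlt)]
        simp
    · have : k = s.length := by omega
      subst this
      rw [pvSplit]
      simp

theorem sum_abs_lt (p : Int) (t : List Int) (h : ∀ x ∈ t, x < p) :
    (t.map (fun x => |p - x|)).sum = p * t.length - t.sum := by
  induction t with
  | nil => simp
  | cons x r ih =>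
    have hx : x < p := h x (by simp)
    simp only [List.map_cons, List.sum_cons, List.length_cons, List.sum_cons]
    rw [ih (fun y hy => h y (by simp [hy]))]
    rw [abs_of_nonneg (by omega : (0:Int) ≤ p - x)]
    push_cast
    ring

theorem sum_abs_ge (p : Int) (d : List Int) (h : ∀ x ∈ d, p ≤ x) :
    (d.map (fun x => |p - x|)).sum = d.sum - p * d.length := by
  induction d with
  | nil => simp
  | cons x r ih =>
    have hx : p ≤ x := h x (by simp)
    simp only [List.map_cons, List.sum_cons, List.length_cons]
    rw [ih (fun y hy => h y (by simp [hy]))]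
    rw [abs_of_nonpos (by omega : p - x ≤ (0:Int))]
    push_cast
    ring

theorem dropWhile_ge (p : Int) (s : List Int) (hs : s.Pairwise (· ≤ ·)) :
    ∀ x ∈ s.dropWhile (fun x => decide (x < p)), p ≤ x := by
  induction s with
  | nil => simp
  | cons a r ih =>
    rw [List.pairwise_cons] at hs
    by_cases ha : a < p
    · simpa [List.dropWhile, ha] using ih hs.2
    · intro x hx
      rw [List.dropWhile_cons_of_neg (by simpa using ha)] at hx
      rcases List.mem_cons.mp hx with rfl | hx
      · omega
      · have := hs.1 x hx; omega

theorem cost_eq (arr : List Int) (p : Int) :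
    (p * (pvSplit (PySem.List.sorted arr (fun x => x) false) p arr.length 0 : Int)
      - PySem.List.pyGetD ((PySem.List.sorted arr (fun x => x) false).foldl
          (fun pre x => pre ++ [PySem.List.pyGetD pre (-1) 0 + x]) [(0:Int)])
          ((pvSplit (PySem.List.sorted arr (fun x => x) false) p arr.length 0 : Nat) : Int) 0)
    + (PySem.List.pyGetD ((PySem.List.sorted arr (fun x => x) false).foldl
          (fun pre x => pre ++ [PySem.List.pyGetD pre (-1) 0 + x]) [(0:Int)]) ((arr.length : Nat) : Int) 0
       - PySem.List.pyGetD ((PySem.List.sorted arr (fun x => x) false).foldl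
          (fun pre x => pre ++ [PySem.List.pyGetD pre (-1) 0 + x]) [(0:Int)])
          ((pvSplit (PySem.List.sorted arr (fun x => x) false) p arr.length 0 : Nat) : Int) 0
       - p * ((arr.length : Int) - (pvSplit (PySem.List.sorted arr (fun x => x) false) p arr.length 0 : Nat)))
    = arr.foldl (fun c num => c + |p - num|) 0 := by
  set s := PySem.List.sorted arr (fun x => x) false with hs
  have hlen : s.length = arr.length := PySem.List.length_sorted ..
  have hperm : s.Perm arr := PySem.List.sorted_perm ..
  have hpw : s.Pairwise (· ≤ ·) := by
    have := PySem.List.sorted_pairwise (xs := arr) (key := fun x : Int => x)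
    simpa using this
  set t := s.takeWhile (fun x => decide (x < p)) with ht
  set d := s.dropWhile (fun x => decide (x < p)) with hd
  have hsplit : t ++ d = s := List.takeWhile_append_dropWhile
  have hk : pvSplit s p arr.length 0 = t.length := by
    rw [← hlen]
    have := pvSplit_eq s p s.length 0 (by omega) (by omega)
    simpa using this
  have hkle : t.length ≤ s.length := by
    rw [← hsplit]
    simp
  have hprefx : s.foldl (fun pre x => pre ++ [PySem.List.pyGetD pre (-1) 0 + x]) [(0:Int)]
      = pvScan 0 s := by
    have := foldl_prefix s [(0:Int)] 0 (by simp) (by simp [PySem.List.pyGetD_neg_one [(0:Int)] 0 (by simp)])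
    simpa using this
  have htake : s.take t.length = t := (List.prefix_iff_eq_take.mp (List.takeWhile_prefix _)).symm
  have hgk : PySem.List.pyGetD (pvScan 0 s) ((t.length : Nat) : Int) 0 = t.sum := by
    rw [PySem.List.pyGetD_natCast]
    rw [pvScan_getD s 0 t.length hkle, htake]
    ring
  have hgn : PySem.List.pyGetD (pvScan 0 s) ((arr.length : Nat) : Int) 0 = s.sum := by
    rw [PySem.List.pyGetD_natCast, ← hlen]
    rw [pvScan_getD s 0 s.length (by omega), List.take_length]
    ring
  have hsum : s.sum = t.sum + d.sum := by rw [← hsplit]; simp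
  have hlen2 : s.length = t.length + d.length := by rw [← hsplit]; simp
  have hrhs : arr.foldl (fun c num => c + |p - num|) 0
      = (t.map (fun x => |p - x|)).sum + (d.map (fun x => |p - x|)).sum := by
    rw [PySem.List.foldl_add]
    rw [((hperm.map (fun x => |p - x|)).sum_eq).symm]
    rw [← hsplit]
    simp
  rw [hprefx, hk, hgk, hgn, hrhs]
  rw [sum_abs_lt p t (fun x hx => by simpa using List.mem_takeWhile_imp hx)]
  rw [sum_abs_ge p d (dropWhile_ge p s hpw)]
  have hcast : (arr.length : Int) = (t.length : Int) + (d.length : Int) := by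
    rw [← hlen]; exact_mod_cast hlen2
  rw [hcast, hsum]
  ring

theorem pair_foldl (arr : List Int) (m1 m2 a b : Int) :
    arr.foldl (fun t num => (t.1 + |m1 - num|, t.2 + |m2 - num|)) (a, b)
      = (arr.foldl (fun s x => s + |m1 - x|) a, arr.foldl (fun s x => s + |m2 - x|) b) := by
  induction arr generalizing a b with
  | nil => rfl
  | cons y ys ih => simp [List.foldl, ih]

theorem func_eq_alt : ∀ (arr : List Int), func arr = func_alt arr := by
  intro arr
  unfold func func_alt
  by_cases h : PySem.Int.mod (arr.length : Int) 2 ≠ 0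
  · simp only [if_pos h, List.foldl_cons, List.foldl_nil, Option.getD_some]
    exact (cost_eq arr _).symm
  · simp only [if_neg h, pair_foldl, List.foldl_cons, List.foldl_nil]
    rw [← cost_eq arr (PySem.List.pyGetD arr (PySem.Int.floordiv (↑arr.length) 2 - 1) 0),
        ← cost_eq arr (PySem.List.pyGetD arr (PySem.Int.floordiv (↑arr.length) 2) 0)]
    split_ifs with hc
    · simp only [Option.getD_some]
      omega
    · simp only [Option.getD_some]
      omega

-- ===== VERDICT (by name: the statement is the Claim_ definition above) =====
theorem func_spec : Claim_equal_func := by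
  intro arr _ _
  unfold Spec_func
  exact func_eq_alt arr
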